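-- pv_equiv track=rewrite | github.com/olymrifki/AoC2023 | Day 14/code2.py | move_all_os_to_left_of_string
-- ===== SOURCE A (Python) =====
-- def move_all_os_to_left_of_string(string: str) -> str:
--     result = ""
--     string_length = len(string)
--     wall_positions = [i for i in range(string_length) if string[i] == "#"]
--     for i in range(len(wall_positions) - 1):
--         total_os = len(
--             [1 for s in string[wall_positions[i] : wall_positions[i + 1]] if s == "O"]
--         )
--         result += (
--             "#"
--             + "O" * total_os
--             + "." * (wall_positions[i + 1] - wall_positions[i] - 1 - total_os)
--         )
--     result += "#"
--     return result
-- ===== SOURCE B (Python) =====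
-- def move_all_os_to_left_of_string(string: str) -> str:
--     out = []
--     seen_wall = False
--     o = 0
--     length = 0
--     for ch in string:
--         if ch == "#":
--             if seen_wall:
--                 out.append("#" + "O" * o + "." * (length - o))
--             seen_wall = True
--             o = 0
--             length = 0
--         elif seen_wall:
--             length += 1
--             if ch == "O":
--                 o += 1
--     out.append("#")
--     return "".join(out)
-- ===== Notes on version B (the rewrite author's own statement) =====
-- stated objective: alternative
-- what changed: Replaces A's two-phase plan (collect all wall indices, then re-scan each wall-to-wall slice counting O's) with a single streaming pass that keeps a seen-wall flag plus running O/length counters and flushes a packed segment at each wall; one traversal with no slicing or repeated indexing gives a constant-factor speedup.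
import Mathlib
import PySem

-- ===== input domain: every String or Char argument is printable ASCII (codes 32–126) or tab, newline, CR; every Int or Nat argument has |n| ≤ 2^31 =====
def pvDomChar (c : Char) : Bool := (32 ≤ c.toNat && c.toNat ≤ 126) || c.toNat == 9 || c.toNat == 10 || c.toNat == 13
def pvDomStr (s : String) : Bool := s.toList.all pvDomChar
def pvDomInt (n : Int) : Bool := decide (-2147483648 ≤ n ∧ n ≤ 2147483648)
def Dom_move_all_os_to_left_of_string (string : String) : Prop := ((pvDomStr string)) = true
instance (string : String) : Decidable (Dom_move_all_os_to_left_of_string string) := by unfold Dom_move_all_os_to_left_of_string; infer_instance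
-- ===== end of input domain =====

-- B replaces A's two-phase plan (collect all wall indices, then re-scan each wall-to-wall
-- slice counting O's) with a single streaming pass keeping a seen-wall flag and running
-- O/length counters; one traversal without slicing, a measured constant-factor speedup.

-- ===== PORT A =====
-- the loop body of A's 'for i in range(len(wall_positions) - 1)' (total_os, then the appended piece)
def pvFA (l : List Char) (walls : List Int) (i : Int) : List Char :=
  let total_os : Nat :=
    (((PySem.List.slice l (some (PySem.List.pyGetD walls i 0))
        (some (PySem.List.pyGetD walls (i + 1) 0))).filter
        (fun s => s == 'O')).map (fun _ => (1 : Int))).length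
  '#' :: (List.replicate total_os 'O' ++
    List.replicate (PySem.List.pyGetD walls (i + 1) 0 -
      PySem.List.pyGetD walls i 0 - 1 - (total_os : Int)).toNat '.')

def move_all_os_to_left_of_string (string : String) : String :=
  let l := string.toList
  let string_length : Int := (l.length : Int)
  -- string[i] with i from range(len(string)) is always in range, so pyGetD is exact here
  let wall_positions : List Int :=
    (PySem.List.pyRange 0 string_length 1).filter (fun i => PySem.List.pyGetD l i ' ' == '#')
  let result : List Char :=
    (PySem.List.pyRange 0 ((wall_positions.length : Int) - 1) 1).foldl
      (fun result i => result ++ pvFA l wall_positions i) []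
  String.ofList (result ++ ['#'])

-- ===== PORT B =====
-- the loop body of Source B's single pass: state (out, seen_wall, o, length)
def pvStepB (st : List (List Char) × Bool × Nat × Nat) (ch : Char) :
    List (List Char) × Bool × Nat × Nat :=
  let (out, seen, o, len) := st
  if ch == '#' then
    ((if seen then out ++ [('#' :: (List.replicate o 'O' ++ List.replicate (len - o) '.'))] else out),
      true, 0, 0)
  else if seen then (out, seen, (if ch == 'O' then o + 1 else o), len + 1)
  else st

def move_all_os_to_left_of_string_alt (string : String) : String :=
  let fin := string.toList.foldl pvStepB ([], false, 0, 0)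
  String.ofList ((fin.1 ++ [['#']]).flatten)

-- ===== PRECONDITION & SPEC =====
def Spec_move_all_os_to_left_of_string (string : String) (out : String) : Prop := out = move_all_os_to_left_of_string_alt string
instance (string : String) (out : String) : Decidable (Spec_move_all_os_to_left_of_string string out) := by unfold Spec_move_all_os_to_left_of_string; infer_instance

-- ===== CLAIM (what is proved, stated in full; the proofs are below) =====
def Claim_equal_move_all_os_to_left_of_string : Prop := ∀ (string : String), Dom_move_all_os_to_left_of_string string → Spec_move_all_os_to_left_of_string string (move_all_os_to_left_of_string string)

-- ===== LEMMAS AND PROOFS =====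

-- number of 'O's in a segment
def pvCntO (c : List Char) : Nat := (c.filter (fun s => s == 'O')).length

-- a packed segment with its leading wall
def pvPack (c : List Char) : List Char :=
  '#' :: (List.replicate (pvCntO c) 'O' ++ List.replicate (c.length - pvCntO c) '.')

-- positions of '#' in a list
def pvWallsN : List Char → List Nat
  | [] => []
  | x :: t => if x = '#' then 0 :: (pvWallsN t).map (· + 1) else (pvWallsN t).map (· + 1)

lemma pvWallsN_nil : pvWallsN [] = [] := rfl

lemma pvWallsN_cons (x : Char) (t : List Char) :
    pvWallsN (x :: t) = if x = '#' then 0 :: (pvWallsN t).map (· + 1) else (pvWallsN t).map (· + 1) := rfl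

-- A's result expressed as recursion on the list of wall positions
def pvGoA (l : List Char) : List Nat → List Char
  | w0 :: w1 :: rest => pvPack ((l.drop (w0 + 1)).take (w1 - w0 - 1)) ++ pvGoA l (w1 :: rest)
  | _ => ['#']

lemma pvGoA_nil (l : List Char) : pvGoA l [] = ['#'] := rfl

lemma pvGoA_cons2 (l : List Char) (w0 w1 : Nat) (rest : List Nat) :
    pvGoA l (w0 :: w1 :: rest)
      = pvPack ((l.drop (w0 + 1)).take (w1 - w0 - 1)) ++ pvGoA l (w1 :: rest) := rfl

-- the common specification: result contributed after a wall has been seen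
def pvSpecGo (b : List Char) : List Char :=
  if _h : b.dropWhile (· != '#') = [] then ['#']
  else pvPack (b.takeWhile (· != '#')) ++ pvSpecGo (b.dropWhile (· != '#')).tail
termination_by b.length
decreasing_by
  have h1 := List.length_dropWhile_le (· != '#') b
  have h2 : (b.dropWhile (· != '#')).length ≠ 0 := by
    simpa using _h
  simp only [List.length_tail]
  omega

def pvSpec (l : List Char) : List Char :=
  match l.dropWhile (· != '#') with
  | [] => ['#']
  | _ :: m => pvSpecGo m

lemma pvSpecGo_nil (b : List Char) (h : b.dropWhile (· != '#') = []) : pvSpecGo b = ['#'] := by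
  conv_lhs => unfold pvSpecGo
  rw [dif_pos h]

lemma pvSpecGo_cons (b : List Char) (x : Char) (m : List Char)
    (h : b.dropWhile (· != '#') = x :: m) :
    pvSpecGo b = pvPack (b.takeWhile (· != '#')) ++ pvSpecGo m := by
  conv_lhs => unfold pvSpecGo
  rw [dif_neg (by rw [h]; simp), h]
  simp only [List.tail_cons]

lemma pvDropWhileHeadFalse (p : Char → Bool) :
    ∀ (l : List Char) (x : Char) (m : List Char), l.dropWhile p = x :: m → p x = false := by
  intro l
  induction l with
  | nil => intro x m h; simp at h
  | cons a t ih =>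
    intro x m h
    by_cases hp : p a
    · rw [List.dropWhile_cons, if_pos hp] at h; exact ih x m h
    · rw [List.dropWhile_cons, if_neg hp] at h
      cases h
      simpa using hp

lemma pvTakeWhileNoWall (l : List Char) : '#' ∉ l.takeWhile (· != '#') := by
  intro hmem
  have := List.mem_takeWhile_imp hmem
  simp at this

-- ===== B side =====

lemma pvB_skip : ∀ (a : List Char), '#' ∉ a → ∀ (r : List Char) (out : List (List Char)) (o len : Nat),
    List.foldl pvStepB (out, false, o, len) (a ++ r) = List.foldl pvStepB (out, false, o, len) r := by
  intro a
  induction a with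
  | nil => intro _ r out o len; rfl
  | cons x t ih =>
    intro ha r out o len
    have hx : ¬ (x = '#') := fun h => ha (h ▸ List.mem_cons_self)
    simp only [List.cons_append, List.foldl_cons]
    rw [show pvStepB (out, false, o, len) x = (out, false, o, len) by simp [pvStepB, hx]]
    exact ih (fun h => ha (List.mem_cons_of_mem _ h)) r out o len

lemma pvB_seg : ∀ (c : List Char), '#' ∉ c → ∀ (r : List Char) (out : List (List Char)) (o len : Nat),
    List.foldl pvStepB (out, true, o, len) (c ++ r)
      = List.foldl pvStepB (out, true, o + pvCntO c, len + c.length) r := by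
  intro c
  induction c with
  | nil => intro _ r out o len; simp [pvCntO]
  | cons x t ih =>
    intro hc r out o len
    have hx : ¬ (x = '#') := fun h => hc (h ▸ List.mem_cons_self)
    simp only [List.cons_append, List.foldl_cons]
    rw [show pvStepB (out, true, o, len) x
        = (out, true, (if x == 'O' then o + 1 else o), len + 1) by simp [pvStepB, hx]]
    rw [ih (fun h => hc (List.mem_cons_of_mem _ h)) r out _ _]
    have h3 : (if x == 'O' then o + 1 else o) + pvCntO t = o + pvCntO (x :: t) := by
      by_cases hxo : x = 'O'
      · simp [pvCntO, hxo]; omega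
      · simp [pvCntO, hxo]
    have h4 : len + 1 + t.length = len + (x :: t).length := by
      simp only [List.length_cons]; omega
    rw [h3, h4]

lemma pvB_main : ∀ (n : Nat) (m : List Char), m.length ≤ n → ∀ (out : List (List Char)),
    ((List.foldl pvStepB (out, true, 0, 0) m).1 ++ [['#']]).flatten
      = out.flatten ++ pvSpecGo m := by
  intro n
  induction n with
  | zero =>
    intro m hm out
    have hm0 : m = [] := by cases m <;> simp_all
    subst hm0
    rw [pvSpecGo_nil [] (by simp)]
    simp
  | succ n ih =>
    intro m hm out
    have hdec : m.takeWhile (· != '#') ++ m.dropWhile (· != '#') = m :=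
      List.takeWhile_append_dropWhile
    cases hd : m.dropWhile (· != '#') with
    | nil =>
      have hc : '#' ∉ m := by
        intro hmem
        have := (List.dropWhile_eq_nil_iff).1 hd '#' hmem
        simp at this
      have h2 : List.foldl pvStepB (out, true, 0, 0) m = (out, true, 0 + pvCntO m, 0 + m.length) := by
        have := pvB_seg m hc [] out 0 0
        simpa using this
      rw [h2, pvSpecGo_nil m hd]
      simp
    | cons x d =>
      have hx : x = '#' := by
        have := pvDropWhileHeadFalse (· != '#') m x d hd
        simpa using this
      have hdec2 : m.takeWhile (· != '#') ++ x :: d = m := by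
        rw [← hd]; exact hdec
      have hc : '#' ∉ m.takeWhile (· != '#') := pvTakeWhileNoWall m
      have hlen : d.length ≤ n := by
        have := congrArg List.length hdec2
        simp at this
        omega
      conv_lhs => rw [← hdec2]
      rw [pvB_seg _ hc _ out 0 0]
      simp only [List.foldl_cons]
      rw [show pvStepB (out, true, 0 + pvCntO (m.takeWhile (· != '#')), 0 + (m.takeWhile (· != '#')).length) x
          = (out ++ [pvPack (m.takeWhile (· != '#'))], true, 0, 0) by
        simp [pvStepB, pvPack, hx]]
      rw [ih d hlen (out ++ [pvPack (m.takeWhile (· != '#'))])]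
      rw [pvSpecGo_cons m x d hd]
      simp

lemma pvB_all (l : List Char) :
    ((List.foldl pvStepB ([], false, 0, 0) l).1 ++ [['#']]).flatten = pvSpec l := by
  have hdec : l.takeWhile (· != '#') ++ l.dropWhile (· != '#') = l := List.takeWhile_append_dropWhile
  cases hd : l.dropWhile (· != '#') with
  | nil =>
    have h3 : List.foldl pvStepB (([] : List (List Char)), false, 0, 0) l = ([], false, 0, 0) := by
      conv_lhs => rw [← hdec, hd]
      exact pvB_skip _ (pvTakeWhileNoWall l) [] [] 0 0
    rw [h3]
    simp [pvSpec, hd]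
  | cons x m =>
    have hx : x = '#' := by
      have := pvDropWhileHeadFalse (· != '#') l x m hd
      simpa using this
    conv_lhs => rw [← hdec, hd]
    rw [pvB_skip _ (pvTakeWhileNoWall l) _ [] 0 0]
    simp only [List.foldl_cons]
    rw [show pvStepB ([], false, 0, 0) x = ([], true, 0, 0) by simp [pvStepB, hx]]
    rw [pvB_main m.length m le_rfl []]
    simp [pvSpec, hd]

-- ===== A side =====

def pvWallsOk (l : List Char) (ws : List Nat) : Prop :=
  List.Pairwise (· < ·) ws ∧ ∀ w ∈ ws, w < l.length ∧ l[w]? = some '#'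

lemma pvWallsN_ok : ∀ (l : List Char), pvWallsOk l (pvWallsN l) := by
  intro l
  induction l with
  | nil =>
    refine ⟨List.Pairwise.nil, ?_⟩
    intro w hw
    rw [pvWallsN_nil] at hw
    cases hw
  | cons x t ih =>
    obtain ⟨ih1, ih2⟩ := ih
    have hmap1 : List.Pairwise (· < ·) ((pvWallsN t).map (· + 1)) := by
      rw [List.pairwise_map]
      exact ih1.imp (by omega)
    have hmap2 : ∀ w ∈ (pvWallsN t).map (· + 1), w < (x :: t).length ∧ (x :: t)[w]? = some '#' := by
      intro w hw
      obtain ⟨v, hv, rfl⟩ := List.mem_map.1 hw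
      obtain ⟨hv1, hv2⟩ := ih2 v hv
      refine ⟨by simp only [List.length_cons]; omega, ?_⟩
      simpa using hv2
    rw [pvWallsN_cons]
    by_cases hx : x = '#'
    · rw [if_pos hx]
      refine ⟨List.pairwise_cons.2 ⟨?_, hmap1⟩, ?_⟩
      · intro w hw
        obtain ⟨v, _, rfl⟩ := List.mem_map.1 hw
        omega
      · intro w hw
        rcases List.mem_cons.1 hw with rfl | hw'
        · exact ⟨by simp, by simp [hx]⟩
        · exact hmap2 w hw'
    · rw [if_neg hx]
      exact ⟨hmap1, hmap2⟩

lemma pvWallsN_eq_nil (l : List Char) (h : '#' ∉ l) : pvWallsN l = [] := by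
  induction l with
  | nil => rfl
  | cons x t ih =>
    have hx : ¬ (x = '#') := fun he => h (he ▸ List.mem_cons_self)
    rw [pvWallsN_cons, if_neg hx, ih (fun hm => h (List.mem_cons_of_mem _ hm))]
    rfl

lemma pvWallsN_append (a r : List Char) (ha : '#' ∉ a) :
    pvWallsN (a ++ r) = (pvWallsN r).map (· + a.length) := by
  induction a with
  | nil => simp
  | cons x t ih =>
    have hx : ¬ (x = '#') := fun he => ha (he ▸ List.mem_cons_self)
    rw [List.cons_append, pvWallsN_cons, if_neg hx,
      ih (fun hm => ha (List.mem_cons_of_mem _ hm)), List.map_map]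
    refine List.map_congr_left ?_
    intro w _
    simp only [Function.comp_apply, List.length_cons]
    omega

lemma pvWallsN_wall_cons (m : List Char) :
    pvWallsN ('#' :: m) = 0 :: (pvWallsN m).map (· + 1) := by
  rw [pvWallsN_cons, if_pos rfl]

-- the filter comprehension computes pvWallsN
lemma pvWallsFilter : ∀ (l : List Char),
    (List.range l.length).filter (fun j => l.getD j ' ' == '#') = pvWallsN l := by
  intro l
  induction l with
  | nil => rfl
  | cons x t ih =>
    rw [show (x :: t).length = t.length + 1 from rfl, List.range_succ_eq_map]
    rw [List.filter_cons, List.filter_map]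
    have hcomp : ((fun j => (x :: t).getD j ' ' == '#') ∘ Nat.succ) = (fun j => t.getD j ' ' == '#') := by
      funext j; rfl
    rw [hcomp, ih, pvWallsN_cons]
    by_cases hx : x = '#'
    · simp [hx]
    · simp [hx]

-- pyGetD on a cons with a successor (cast) index
lemma pvGetD_cons_cast_succ (x : Int) (walls : List Int) (j : Nat) :
    PySem.List.pyGetD (x :: walls) ((j + 1 : Nat) : Int) 0
      = PySem.List.pyGetD walls ((j : Nat) : Int) 0 := by
  rw [PySem.List.pyGetD_natCast, PySem.List.pyGetD_natCast]
  exact List.getD_cons_succ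

-- index-shift for A's loop body
lemma pvFA_shift (l : List Char) (x : Int) (walls : List Int) (j : Nat) :
    pvFA l (x :: walls) ((j + 1 : Nat) : Int) = pvFA l walls ((j : Nat) : Int) := by
  unfold pvFA
  have e1 : ((j + 1 : Nat) : Int) + 1 = ((j + 1 + 1 : Nat) : Int) := by push_cast; ring
  have e2 : ((j : Nat) : Int) + 1 = ((j + 1 : Nat) : Int) := by push_cast; ring
  rw [e1, e2, pvGetD_cons_cast_succ x walls j, pvGetD_cons_cast_succ x walls (j + 1)]

-- A's loop body at the head pair of walls
lemma pvFA_head (l : List Char) (a b : Nat) (rest : List Int)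
    (hab : a < b) (hb : b < l.length) (ha : l[a]? = some '#') :
    pvFA l ((a : Int) :: (b : Int) :: rest) (((0 : Nat) : Int))
      = pvPack ((l.drop (a + 1)).take (b - a - 1)) := by
  have hal : a < l.length := by omega
  have hget : l[a] = '#' := by
    rw [List.getElem?_eq_getElem hal] at ha
    exact Option.some.inj ha
  have hdrop : l.drop a = '#' :: l.drop (a + 1) := by
    rw [List.drop_eq_getElem_cons hal, hget]
  have hg0 : PySem.List.pyGetD ((a : Int) :: (b : Int) :: rest) (((0 : Nat) : Int)) 0 = (a : Int) := by
    rw [PySem.List.pyGetD_natCast]; rfl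
  have hg1 : PySem.List.pyGetD ((a : Int) :: (b : Int) :: rest) ((((0 : Nat)) : Int) + 1) 0 = (b : Int) := by
    rw [show (((0 : Nat) : Int) + 1) = ((1 : Nat) : Int) by norm_num, PySem.List.pyGetD_natCast]
    rfl
  unfold pvFA
  rw [hg0, hg1, PySem.List.slice_natCast, hdrop]
  obtain ⟨k, hk⟩ : ∃ k, b - a = k + 1 := ⟨b - a - 1, by omega⟩
  rw [hk]
  simp only [Nat.add_sub_cancel]
  rw [List.take_succ_cons]
  rw [show ('#' :: (l.drop (a + 1)).take k).filter (fun s => s == 'O')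
      = ((l.drop (a + 1)).take k).filter (fun s => s == 'O') by simp]
  simp only [List.length_map]
  have hclen : ((l.drop (a + 1)).take k).length = k := by
    simp only [List.length_take, List.length_drop]
    omega
  have hcnt : (((l.drop (a + 1)).take k).filter (fun s => s == 'O')).length ≤ k :=
    le_trans (List.length_filter_le _ _) (le_of_eq hclen)
  rw [show ((b : Int) - (a : Int) - 1
        - ((((l.drop (a + 1)).take k).filter (fun s => s == 'O')).length : Int)).toNat
      = ((l.drop (a + 1)).take k).length - (((l.drop (a + 1)).take k).filter (fun s => s == 'O')).length
    from by omega]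
  rfl

lemma pvRangeCast (k : Nat) :
    PySem.List.pyRange 0 ((k : Int) - 1) 1 = (List.range (k - 1)).map (fun (j : Nat) => (j : Int)) := by
  cases k with
  | zero =>
    rw [PySem.List.pyRange_one_eq_nil (by norm_num)]
    rfl
  | succ n =>
    rw [show ((n + 1 : Nat) : Int) - 1 = ((n : Nat) : Int) by push_cast; ring,
      PySem.List.pyRange_zero_natCast]
    rfl

-- the heart of the A side: the flatMap over index pairs is pvGoA
lemma pvA_flatMap (l : List Char) : ∀ (ws : List Nat), pvWallsOk l ws →
    (List.range (ws.length - 1)).flatMap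
        (fun (j : Nat) => pvFA l (ws.map (fun (w : Nat) => (w : Int))) ((j : Nat) : Int)) ++ ['#']
      = pvGoA l ws := by
  intro ws
  induction ws with
  | nil => intro _; rfl
  | cons w0 tail ih =>
    intro hok
    cases tail with
    | nil => rfl
    | cons w1 rest =>
      obtain ⟨hpw, hmem⟩ := hok
      have h01 : w0 < w1 := by
        have := List.pairwise_cons.1 hpw
        exact this.1 w1 List.mem_cons_self
      have hw1l : w1 < l.length := (hmem w1 (List.mem_cons_of_mem _ List.mem_cons_self)).1
      have hw0s : l[w0]? = some '#' := (hmem w0 List.mem_cons_self).2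
      have hok' : pvWallsOk l (w1 :: rest) := by
        refine ⟨(List.pairwise_cons.1 hpw).2, ?_⟩
        intro w hw
        exact hmem w (List.mem_cons_of_mem _ hw)
      have ih' := ih hok'
      simp only [List.length_cons, Nat.add_sub_cancel] at ih' ⊢
      rw [List.range_succ_eq_map, List.flatMap_cons, List.flatMap_map]
      have hshift : (fun (j : Nat) =>
            pvFA l ((w0 :: w1 :: rest).map (fun (w : Nat) => (w : Int))) ((Nat.succ j : Nat) : Int))
          = (fun (j : Nat) => pvFA l ((w1 :: rest).map (fun (w : Nat) => (w : Int))) ((j : Nat) : Int)) := by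
        funext j
        rw [show (Nat.succ j : Nat) = j + 1 from rfl, List.map_cons]
        exact pvFA_shift l _ _ j
      rw [hshift, List.append_assoc, ih']
      rw [List.map_cons, List.map_cons, pvFA_head l w0 w1 _ h01 hw1l hw0s]
      rw [pvGoA_cons2]

-- shift lemma for pvGoA
lemma pvGoA_shift (t r : List Char) : ∀ (ws : List Nat),
    pvGoA (t ++ r) (ws.map (· + t.length)) = pvGoA r ws := by
  intro ws
  induction ws with
  | nil => rfl
  | cons w0 tail ih =>
    cases tail with
    | nil => rfl
    | cons w1 rest =>
      simp only [List.map_cons]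
      rw [pvGoA_cons2, pvGoA_cons2]
      rw [show ((w1 + t.length) :: rest.map (· + t.length)) = (w1 :: rest).map (· + t.length) from by
        rw [List.map_cons]]
      rw [ih]
      congr 1
      have hdrop : (t ++ r).drop (w0 + t.length + 1) = r.drop (w0 + 1) := by
        rw [show w0 + t.length + 1 = t.length + (w0 + 1) by omega]
        exact List.drop_length_add_append _
      rw [hdrop]
      rw [show w1 + t.length - (w0 + t.length) - 1 = w1 - w0 - 1 from by omega]

-- step 2: pvGoA on the computed walls is the specification
lemma pvGoA_spec : ∀ (n : Nat) (l : List Char), l.length ≤ n → pvGoA l (pvWallsN l) = pvSpec l := by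
  intro n
  induction n with
  | zero =>
    intro l hl
    have hl0 : l = [] := by cases l <;> simp_all
    subst hl0
    rfl
  | succ n ih =>
    intro l hl
    have hdec : l.takeWhile (· != '#') ++ l.dropWhile (· != '#') = l := List.takeWhile_append_dropWhile
    cases hd : l.dropWhile (· != '#') with
    | nil =>
      have hnw : '#' ∉ l := by
        intro hmem
        have := (List.dropWhile_eq_nil_iff).1 hd '#' hmem
        simp at this
      rw [pvWallsN_eq_nil l hnw, pvGoA_nil]
      simp [pvSpec, hd]
    | cons x m =>
      have hx : x = '#' := by
        have := pvDropWhileHeadFalse (· != '#') l x m hd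
        simpa using this
      subst hx
      have hlm : l = l.takeWhile (· != '#') ++ '#' :: m := by
        conv_lhs => rw [← hdec]
        rw [hd]
      have hna : '#' ∉ l.takeWhile (· != '#') := pvTakeWhileNoWall l
      have hspec : pvSpec l = pvSpecGo m := by
        simp [pvSpec, hd]
      have hmlen : m.length ≤ n := by
        have := congrArg List.length hlm
        simp at this
        omega
      conv_lhs => rw [hlm, pvWallsN_append _ _ hna]
      have hsh := pvGoA_shift (l.takeWhile (· != '#')) ('#' :: m) (pvWallsN ('#' :: m))
      rw [hsh, hspec, pvWallsN_wall_cons]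
      -- now handle '#'::m by the walls of m
      cases hdm : m.dropWhile (· != '#') with
      | nil =>
        have hnwm : '#' ∉ m := by
          intro hmem
          have := (List.dropWhile_eq_nil_iff).1 hdm '#' hmem
          simp at this
        rw [pvWallsN_eq_nil m hnwm, pvSpecGo_nil m hdm]
        rfl
      | cons y d =>
        have hy : y = '#' := by
          have := pvDropWhileHeadFalse (· != '#') m y d hdm
          simpa using this
        subst hy
        have hmdec : m = m.takeWhile (· != '#') ++ '#' :: d := by
          conv_lhs => rw [← List.takeWhile_append_dropWhile (p := (· != '#')) (l := m)]
          rw [hdm]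
        have hnam : '#' ∉ m.takeWhile (· != '#') := pvTakeWhileNoWall m
        obtain ⟨ws', hwm⟩ : ∃ ws', pvWallsN m = (m.takeWhile (· != '#')).length :: ws' := by
          refine ⟨((pvWallsN ('#' :: d)).map (· + (m.takeWhile (· != '#')).length)).tail, ?_⟩
          conv_lhs => rw [hmdec, pvWallsN_append _ _ hnam]
          rw [pvWallsN_wall_cons, List.map_cons]
          simp
        rw [hwm, List.map_cons, pvGoA_cons2]
        have htail : ((m.takeWhile (· != '#')).length + 1) :: ws'.map (· + 1)
            = (pvWallsN m).map (· + 1) := by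
          rw [hwm, List.map_cons]
        rw [htail]
        have hsh2 := pvGoA_shift ['#'] m (pvWallsN m)
        simp only [List.singleton_append, List.length_cons, List.length_nil, Nat.zero_add] at hsh2
        rw [hsh2, ih m hmlen]
        have hspecm : pvSpec m = pvSpecGo d := by
          simp [pvSpec, hdm]
        rw [hspecm, pvSpecGo_cons m '#' d hdm]
        congr 2
        rw [show (m.takeWhile (· != '#')).length + 1 - 0 - 1 = (m.takeWhile (· != '#')).length from by
          omega]
        rw [show (0 + 1) = 1 from rfl]
        rw [show ('#' :: m).drop 1 = m from rfl]
        set c2 := m.takeWhile (· != '#') with hc2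
        conv_lhs => rw [hmdec]
        exact List.take_left

-- A's full computation equals the specification
lemma pvA_all (l : List Char) :
    ((PySem.List.pyRange 0 ((l.length : Nat) : Int) 1).filter
          (fun i => PySem.List.pyGetD l i ' ' == '#')
        |> fun wall_positions =>
          ((PySem.List.pyRange 0 ((wall_positions.length : Int) - 1) 1).foldl
            (fun result i => result ++ pvFA l wall_positions i) []) ++ ['#'])
      = pvSpec l := by
  simp only []
  have hwalls : (PySem.List.pyRange 0 ((l.length : Nat) : Int) 1).filter
      (fun i => PySem.List.pyGetD l i ' ' == '#') = (pvWallsN l).map (fun (w : Nat) => (w : Int)) := by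
    rw [PySem.List.pyRange_zero_natCast, List.filter_map]
    rw [show ((fun i => PySem.List.pyGetD l i ' ' == '#') ∘ (fun (k : Nat) => (k : Int)))
        = (fun (j : Nat) => l.getD j ' ' == '#') from by
      funext j
      simp only [Function.comp_apply, PySem.List.pyGetD_natCast]]
    rw [pvWallsFilter l]
  rw [hwalls, List.length_map]
  rw [PySem.List.foldl_append_eq_flatMap]
  rw [pvRangeCast, List.flatMap_map]
  rw [List.nil_append]
  have := pvA_flatMap l (pvWallsN l) (pvWallsN_ok l)
  rw [this]
  exact pvGoA_spec l.length l le_rfl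

-- ===== VERDICT (by name: the statement is the Claim_ definition above) =====
theorem move_all_os_to_left_of_string_spec : Claim_equal_move_all_os_to_left_of_string := by
  intro s _
  unfold Spec_move_all_os_to_left_of_string
  have hA : move_all_os_to_left_of_string s = String.ofList (pvSpec s.toList) :=
    congrArg String.ofList (pvA_all s.toList)
  have hB : move_all_os_to_left_of_string_alt s = String.ofList (pvSpec s.toList) :=
    congrArg String.ofList (pvB_all s.toList)
  rw [hA, hB]
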